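-- pv_equiv track=rewrite | github.com/j-kyung99/Python-codingtest | 프로그래머스/1/140108. 문자열 나누기/문자열 나누기.py | solution
-- ===== SOURCE A (Python) =====
-- def solution(s):
--     answer = 0
--     yes = 0
--     no = 0
--     x = s[0]
--     for i in range(len(s)):
--         if s[i] == x:
--             yes += 1
--         else:
--             no += 1
--         if yes == no:
--             answer += 1
--             if i+1 < len(s):
--                 x = s[i+1]
--         if yes != no:
--             if i == len(s) - 1:
--                 answer += 1
--     return answer
-- ===== SOURCE B (Python) =====
-- def solution(s):
--     answer = 0
--     rest = s
--     while rest: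
--         answer += 1
--         first = rest[0]
--         n = len(rest)
--         cut = n
--         for m in range(1, n // 2 + 1):
--             if 2 * rest.count(first, 0, 2 * m) == 2 * m:
--                 cut = 2 * m
--                 break
--         rest = rest[cut:]
--     return answer
-- ===== Notes on version B (the rewrite author's own statement) =====
-- stated objective: alternative
-- what changed: Replaced A's single pass with global never-reset yes/no counters and next-char pointer reassignment by a recursive/segment formulation with no running counters at all: each segment's cut point is found by querying str.count on even-length prefixes (first j with 2*count(first, 0, j) == j), then the string is sliced and the process repeats on the remainder.
-- crash fix: On the empty string A raises IndexError at s[0]; B enters no segment and returns 0. — e.g. on solution(""): A raises IndexError, B returns 0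
import Mathlib
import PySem

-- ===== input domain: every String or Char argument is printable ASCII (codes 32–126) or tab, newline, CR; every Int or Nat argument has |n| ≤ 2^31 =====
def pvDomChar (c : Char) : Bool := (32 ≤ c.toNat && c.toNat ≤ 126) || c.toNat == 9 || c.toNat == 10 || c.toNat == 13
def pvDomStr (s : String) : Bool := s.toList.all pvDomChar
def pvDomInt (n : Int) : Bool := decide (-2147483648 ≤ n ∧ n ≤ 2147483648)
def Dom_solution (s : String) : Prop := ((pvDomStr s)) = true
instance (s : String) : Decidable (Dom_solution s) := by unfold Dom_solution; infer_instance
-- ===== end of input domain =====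

-- B replaces A's single pass with global never-resetting yes/no counters and next-char pointer
-- reassignment by a recursive segment formulation with no running counters: each cut point is the
-- first even prefix length j with 2*count(first char, prefix j) = j, found by prefix count queries,
-- then recurse on the remainder (objective: alternative); on the empty string A raises IndexError
-- while B returns 0 (excluded by Pre_, stated in Raises_).


-- ===== PORT A =====
-- one iteration of A's for-loop body (state = (answer, yes, no, x))
def solutionStep (cs : List Char) (n : Nat) (st : Int × Int × Int × Char) (i : Nat) :
    Int × Int × Int × Char :=
  match st with
  | (answer, yes, no, x) =>
    let c := cs.getD i ' '
    let yes := if c = x then yes + 1 else yes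
    let no := if c = x then no else no + 1
    let answer := if yes = no then answer + 1 else answer
    let x := if yes = no then (if i + 1 < n then cs.getD (i + 1) ' ' else x) else x
    let answer := if yes ≠ no ∧ i = n - 1 then answer + 1 else answer
    (answer, yes, no, x)

def solution (s : String) : Int :=
  let cs := s.toList
  let n := cs.length
  let x0 := cs.getD 0 ' '   -- s[0]; Python raises IndexError on the empty string (outside Pre_)
  ((List.range n).foldl (solutionStep cs n) (0, 0, 0, x0)).1

-- ===== PORT B =====
-- Source B's inner for-loop with break: the first m in range(1, n//2 + 1) with
-- 2 * rest.count(first, 0, 2*m) == 2*m gives cut = 2*m, else cut = n.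
def cutOf (l : List Char) : Nat :=
  match (PySem.List.pyRange 1 ((l.length / 2 : Nat) + 1) 1).find?
      (fun m => 2 * (((l.take (2 * m).toNat).count (l.headD ' ') : Int)) == 2 * m) with
  | some m => (2 * m).toNat
  | none => l.length

theorem cutOf_pos (c : Char) (t : List Char) : 1 ≤ cutOf (c :: t) := by
  unfold cutOf
  split
  · next m heq =>
      have hm := List.mem_of_find?_eq_some heq
      rw [PySem.List.mem_pyRange_one] at hm
      omega
  · simp

-- Source B's outer while loop: one answer += 1 per segment, then recurse on rest[cut:]
def segLoopB : List Char → Int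
  | [] => 0
  | c :: t => 1 + segLoopB ((c :: t).drop (cutOf (c :: t)))
termination_by l => l.length
decreasing_by
  have h := cutOf_pos c t
  simp only [List.length_drop, List.length_cons]
  omega

def solution_alt (s : String) : Int := segLoopB s.toList

-- ===== PRECONDITION & SPEC =====
-- Pre_ excludes only the empty string, on which A raises IndexError at s[0].
def Pre_solution (s : String) : Prop := s ≠ ""
instance (s : String) : Decidable (Pre_solution s) := by unfold Pre_solution; infer_instance
def pvWitness_solution : String := "aabbac"

-- On the empty string A raises IndexError (s[0]) while B enters no segment and returns 0.
def Raises_solution (s : String) : Prop := s = ""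
instance (s : String) : Decidable (Raises_solution s) := by unfold Raises_solution; infer_instance
def pvRaiseWitness_solution : String := ""
def pvRaiseWitnessOut_solution : Int := 0

def Spec_solution (s : String) (out : Int) : Prop := out = solution_alt s
instance (s : String) (out : Int) : Decidable (Spec_solution s out) := by unfold Spec_solution; infer_instance

-- ===== CLAIM (what is proved, stated in full; the proofs are below) =====
def Claim_equal_solution : Prop := ∀ (s : String), Dom_solution s → Pre_solution s → Spec_solution s (solution s)
def Claim_raises_solution : Prop := (∀ (s : String), Dom_solution s → Raises_solution s → ¬ Pre_solution s) ∧ (Dom_solution (pvRaiseWitness_solution) ∧ Raises_solution (pvRaiseWitness_solution) ∧ solution_alt (pvRaiseWitness_solution) = pvRaiseWitnessOut_solution)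

-- ===== LEMMAS AND PROOFS =====

-- Proof-side balance walk: A's fold is first shown equal to `segLoop`, a per-segment balance
-- recursion, which is then shown equal to B's prefix-count recursion `segLoopB`.
def segEnd (first : Char) (bal : Int) : List Char → List Char
  | [] => []
  | c :: rest =>
      let bal := bal + (if c = first then 1 else -1)
      if bal = 0 then rest else segEnd first bal rest

theorem segEnd_length_le (first : Char) (bal : Int) (l : List Char) :
    (segEnd first bal l).length ≤ l.length := by
  induction l generalizing bal with
  | nil => simp [segEnd]
  | cons c rest ih =>
      simp only [segEnd, List.length_cons]
      split
      all_goals split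
      · exact Nat.le_succ _
      · exact le_trans (ih _) (Nat.le_succ _)
      · exact Nat.le_succ _
      · exact le_trans (ih _) (Nat.le_succ _)

def segLoop : List Char → Int
  | [] => 0
  | c :: rest => 1 + segLoop (segEnd c 0 (c :: rest))
termination_by l => l.length
decreasing_by
  have h1 : segEnd c 0 (c :: rest) = segEnd c 1 rest := by simp [segEnd]
  simpa [h1] using Nat.lt_succ_of_le (segEnd_length_le c 1 rest)

-- Joint invariant for A's fold over the remaining indices, phrased over the remaining suffix l.
-- Inner: mid-segment (yes ≠ no, x = the segment's first char, yes - no = the balance).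
theorem inner_outer
    (cs : List Char) (l : List Char) :
    (∀ (i : Nat) (ans yes no : Int) (x : Char),
        cs.drop i = l → i + l.length = cs.length → yes ≠ no →
        ((List.range' i l.length).foldl (solutionStep cs cs.length) (ans, yes, no, x)).1
          = ans + (if l = [] then 0 else 1 + segLoop (segEnd x (yes - no) l)))
    ∧
    (∀ (i : Nat) (ans k : Int) (x : Char),
        cs.drop i = l → i + l.length = cs.length → (l ≠ [] → x = l.head!) →
        ((List.range' i l.length).foldl (solutionStep cs cs.length) (ans, k, k, x)).1
          = ans + segLoop l) := by
  induction l with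
  | nil =>
      constructor
      · intro i ans yes no x _ _ _
        simp
      · intro i ans k x _ _ _
        simp [segLoop]
  | cons c rest ih =>
      obtain ⟨ihI, ihO⟩ := ih
      have getD_at : ∀ (i : Nat), cs.drop i = c :: rest → cs[i]? = some c := by
        intro i hdrop
        have h := (List.getElem?_drop : (List.drop i cs)[0]? = cs[i + 0]?)
        simpa [hdrop] using h.symm
      have drop_succ : ∀ (i : Nat), cs.drop i = c :: rest → cs.drop (i + 1) = rest := by
        intro i hdrop
        have h : cs.drop (i + 1) = (cs.drop i).drop 1 := by rw [List.drop_drop]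
        simp [h, hdrop]
      have getD_next : ∀ (i : Nat), cs.drop i = c :: rest → rest ≠ [] →
          cs.getD (i + 1) ' ' = rest.head! := by
        intro i hdrop hne
        obtain ⟨r0, rs, rfl⟩ := List.exists_cons_of_ne_nil hne
        have h := (List.getElem?_drop : (List.drop (i + 1) cs)[0]? = cs[(i + 1) + 0]?)
        have h0 : cs[i + 1]? = some r0 := by simpa [drop_succ i hdrop] using h.symm
        simp [List.getD_eq_getElem?_getD, h0]
      constructor
      · -- inner: mid-segment
        intro i ans yes no x hdrop hlen hne
        have hlen1 : i + 1 + rest.length = cs.length := by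
          simp only [List.length_cons] at hlen; omega
        rw [List.length_cons, List.range'_succ, List.foldl_cons]
        by_cases hcx : c = x
        · by_cases heq : yes + 1 = no
          · -- match, and the balance hits zero: segment complete
            have hstep : solutionStep cs cs.length (ans, yes, no, x) i
                = (ans + 1, no, no, if i + 1 < cs.length then cs.getD (i + 1) ' ' else x) := by
              simp [solutionStep, List.getD_eq_getElem?_getD, getD_at i hdrop, hcx, heq]
            have hseg : segEnd x (yes - no) (c :: rest) = rest := by
              simp [segEnd, hcx]; omega
            have hx' : (rest ≠ [] →
                (if i + 1 < cs.length then cs.getD (i + 1) ' ' else x) = rest.head!) := by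
              intro hr
              have hlt : i + 1 < cs.length := by
                have := List.length_pos_of_ne_nil hr; omega
              rw [if_pos hlt, getD_next i hdrop hr]
            rw [hstep, ihO (i + 1) (ans + 1) no _ (drop_succ i hdrop) hlen1 hx',
              if_neg (by simp : ¬ (c :: rest = [])), hseg]
            ring
          · -- match, still inside the segment
            have hseg : segEnd x (yes - no) (c :: rest) = segEnd x (yes - no + 1) rest := by
              have h1 : yes - no + 1 ≠ 0 := by omega
              simp [segEnd, hcx, h1]
            rcases eq_or_ne rest ([] : List Char) with hre | hre
            · subst hre
              have hstep : solutionStep cs cs.length (ans, yes, no, x) i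
                  = (ans + 1, yes + 1, no, x) := by
                have hi : i = cs.length - 1 := by simp at hlen1; omega
                have hlt : ¬ (i + 1 < cs.length) := by omega
                simp [solutionStep, List.getD_eq_getElem?_getD, getD_at i hdrop, hcx, heq, eq_true hi]
              rw [hstep]
              simp [segEnd, segLoop]
            · have hstep : solutionStep cs cs.length (ans, yes, no, x) i
                  = (ans, yes + 1, no, x) := by
                have hi : ¬ (i = cs.length - 1) := by
                  have := List.length_pos_of_ne_nil hre; omega
                simp [solutionStep, List.getD_eq_getElem?_getD, getD_at i hdrop, hcx, heq, eq_false hi]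
              rw [hstep, ihI (i + 1) ans (yes + 1) no x (drop_succ i hdrop) hlen1 (by omega),
                if_neg hre, if_neg (by simp : ¬ (c :: rest = [])), hseg,
                (by ring : yes + 1 - no = yes - no + 1)]
        · -- mismatch, and the balance hits zero: segment complete
          by_cases heq : yes = no + 1
          · have hstep : solutionStep cs cs.length (ans, yes, no, x) i
                = (ans + 1, no + 1, no + 1, if i + 1 < cs.length then cs.getD (i + 1) ' ' else x) := by
              simp [solutionStep, List.getD_eq_getElem?_getD, getD_at i hdrop, hcx, heq]
            have hseg : segEnd x (yes - no) (c :: rest) = rest := by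
              simp [segEnd, hcx]; omega
            have hx' : (rest ≠ [] →
                (if i + 1 < cs.length then cs.getD (i + 1) ' ' else x) = rest.head!) := by
              intro hr
              have hlt : i + 1 < cs.length := by
                have := List.length_pos_of_ne_nil hr; omega
              rw [if_pos hlt, getD_next i hdrop hr]
            rw [hstep, ihO (i + 1) (ans + 1) (no + 1) _ (drop_succ i hdrop) hlen1 hx',
              if_neg (by simp : ¬ (c :: rest = [])), hseg]
            ring
          · -- mismatch, still inside the segment
            have hseg : segEnd x (yes - no) (c :: rest) = segEnd x (yes - no - 1) rest := by
              have h1 : yes - no + -1 ≠ 0 := by omega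
              have h2 : yes - no + -1 = yes - no - 1 := by ring
              have h3 : yes - no - 1 ≠ 0 := by omega
              simp [segEnd, hcx, h2, h3]
            rcases eq_or_ne rest ([] : List Char) with hre | hre
            · subst hre
              have hstep : solutionStep cs cs.length (ans, yes, no, x) i
                  = (ans + 1, yes, no + 1, x) := by
                have hi : i = cs.length - 1 := by simp at hlen1; omega
                have hlt : ¬ (i + 1 < cs.length) := by omega
                simp [solutionStep, List.getD_eq_getElem?_getD, getD_at i hdrop, hcx, heq, eq_true hi]
              rw [hstep]
              simp [segEnd, segLoop]
            · have hstep : solutionStep cs cs.length (ans, yes, no, x) i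
                  = (ans, yes, no + 1, x) := by
                have hi : ¬ (i = cs.length - 1) := by
                  have := List.length_pos_of_ne_nil hre; omega
                simp [solutionStep, List.getD_eq_getElem?_getD, getD_at i hdrop, hcx, heq, eq_false hi]
              rw [hstep, ihI (i + 1) ans yes (no + 1) x (drop_succ i hdrop) hlen1 (by omega),
                if_neg hre, if_neg (by simp : ¬ (c :: rest = [])), hseg,
                (by ring : yes - (no + 1) = yes - no - 1)]
      · -- outer: at a segment boundary, x is the new segment's first char
        intro i ans k x hdrop hlen hx
        have hlen1 : i + 1 + rest.length = cs.length := by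
          simp only [List.length_cons] at hlen; omega
        have hxc : x = c := by simpa using hx (by simp)
        rw [hxc]
        rw [List.length_cons, List.range'_succ, List.foldl_cons]
        have hsegL : segLoop (c :: rest) = 1 + segLoop (segEnd c 1 rest) := by
          have h1 : segEnd c 0 (c :: rest) = segEnd c 1 rest := by simp [segEnd]
          rw [segLoop, h1]
        rcases eq_or_ne rest ([] : List Char) with hre | hre
        · subst hre
          have hstep : solutionStep cs cs.length (ans, k, k, c) i
              = (ans + 1, k + 1, k, c) := by
            have hi : i = cs.length - 1 := by simp at hlen1; omega
            simp [solutionStep, List.getD_eq_getElem?_getD, getD_at i hdrop, eq_true hi]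
          rw [hstep]
          simp [hsegL, segEnd, segLoop]
        · have hstep : solutionStep cs cs.length (ans, k, k, c) i
              = (ans, k + 1, k, c) := by
            have hi : ¬ (i = cs.length - 1) := by
              have := List.length_pos_of_ne_nil hre; omega
            simp [solutionStep, List.getD_eq_getElem?_getD, getD_at i hdrop, eq_false hi]
          rw [hstep, ihI (i + 1) ans (k + 1) k c (drop_succ i hdrop) hlen1 (by omega),
            if_neg hre, hsegL, (by ring : k + 1 - k = (1 : Int))]

-- === Bridge: the balance walk equals B's prefix-count recursion ===

-- balance after consuming the first j characters of t, started at b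
def balAt (c : Char) (b : Int) (t : List Char) (j : Nat) : Int :=
  b + 2 * ((t.take j).count c : Int) - j

theorem balAt_cons (c d : Char) (b : Int) (t : List Char) (j : Nat) :
    balAt c b (d :: t) (j + 1) = balAt c (b + (if d = c then 1 else -1)) t j := by
  unfold balAt
  rw [List.take_succ_cons, List.count_cons]
  by_cases h : d = c <;> simp [h] <;> ring

-- number of characters segEnd consumes
def scan (c : Char) (b : Int) : List Char → Nat
  | [] => 0
  | d :: t =>
      if b + (if d = c then 1 else -1) = 0 then 1
      else 1 + scan c (b + (if d = c then 1 else -1)) t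

theorem segEnd_eq_drop_scan (c : Char) (b : Int) (t : List Char) :
    segEnd c b t = t.drop (scan c b t) := by
  induction t generalizing b with
  | nil => simp [segEnd, scan]
  | cons d t ih =>
      by_cases h : b + (if d = c then 1 else -1) = 0
      · simp [segEnd, scan, h]
      · simp only [segEnd, scan, if_neg h]
        rw [ih, Nat.add_comm, List.drop_succ_cons]

theorem scan_eq_of_zero (c : Char) (b : Int) (t : List Char) (k : Nat)
    (hk1 : 1 ≤ k) (hkl : k ≤ t.length) (hz : balAt c b t k = 0)
    (hmin : ∀ j, 1 ≤ j → j < k → balAt c b t j ≠ 0) :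
    scan c b t = k := by
  induction t generalizing b k with
  | nil => simp at hkl; omega
  | cons d t ih =>
      have hb1 : balAt c b (d :: t) 1 = b + (if d = c then 1 else -1) := by
        have := balAt_cons c d b t 0
        simpa [balAt] using this
      by_cases hz1 : b + (if d = c then 1 else -1) = 0
      · simp only [scan, if_pos hz1]
        by_contra hne
        have hk2 : 1 < k := by omega
        exact hmin 1 le_rfl hk2 (by rw [hb1]; exact hz1)
      · simp only [scan, if_neg hz1]
        have hk2 : 2 ≤ k := by
          by_contra hlt
          have hk1' : k = 1 := by omega
          subst hk1'
          exact hz1 (by rw [← hb1]; exact hz)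
        have := ih (b + (if d = c then 1 else -1)) (k - 1) (by omega)
          (by simp at hkl; omega)
          (by have h := balAt_cons c d b t (k - 1)
              rw [(by omega : k - 1 + 1 = k)] at h
              rw [← h]; exact hz)
          (by intro j hj1 hjk
              have h := balAt_cons c d b t j
              rw [← h]
              exact hmin (j + 1) (by omega) (by omega))
        omega

theorem scan_eq_length_of_no_zero (c : Char) (b : Int) (t : List Char)
    (h : ∀ j, 1 ≤ j → j ≤ t.length → balAt c b t j ≠ 0) :
    scan c b t = t.length := by
  induction t generalizing b with
  | nil => simp [scan]
  | cons d t ih =>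
      have hb1 : balAt c b (d :: t) 1 = b + (if d = c then 1 else -1) := by
        have := balAt_cons c d b t 0
        simpa [balAt] using this
      have hz1 : ¬ (b + (if d = c then 1 else -1) = 0) := by
        rw [← hb1]; exact h 1 le_rfl (by simp)
      simp only [scan, if_neg hz1]
      rw [ih _ (by
        intro j hj1 hjl
        have hc := balAt_cons c d b t j
        rw [← hc]
        exact h (j + 1) (by omega) (by simpa using Nat.succ_le_succ hjl))]
      rw [List.length_cons]
      omega

-- first-match characterisation of find? over an increasing unit range
theorem find?_pyRange_one_some (p : Int → Bool) (a b x : Int)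
    (h : (PySem.List.pyRange a b 1).find? p = some x) :
    a ≤ x ∧ x < b ∧ p x = true ∧ ∀ y, a ≤ y → y < x → p y = false := by
  by_cases hab : b ≤ a
  · rw [PySem.List.pyRange_one_eq_nil hab] at h
    simp at h
  · have hab' : a < b := lt_of_not_ge hab
    rw [PySem.List.pyRange_one_cons hab'] at h
    by_cases hpa : p a = true
    · rw [List.find?_cons_of_pos hpa] at h
      obtain rfl : a = x := by simpa using h
      exact ⟨le_rfl, hab', hpa, fun y h1 h2 => absurd (lt_of_le_of_lt h1 h2) (lt_irrefl a)⟩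
    · rw [List.find?_cons_of_neg (by simpa using hpa)] at h
      obtain ⟨h1, h2, h3, h4⟩ := find?_pyRange_one_some p (a + 1) b x h
      refine ⟨by omega, h2, h3, fun y hy1 hy2 => ?_⟩
      by_cases hya : y = a
      · subst hya; simpa using hpa
      · exact h4 y (by omega) hy2
termination_by (b - a).toNat
decreasing_by omega

-- the prefix-count cut of Source B is exactly one past the balance walk's scan
theorem cutOf_eq_scan (c : Char) (t : List Char) :
    cutOf (c :: t) = scan c 1 t + 1 := by
  unfold cutOf
  simp only [List.length_cons, List.headD_cons]
  -- balance on c :: t from 0 vs on t from 1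
  have hshift : ∀ j : Nat, balAt c 0 (c :: t) (j + 1) = balAt c 1 t j := by
    intro j
    have := balAt_cons c c 0 t j
    simpa using this
  have hpred : ∀ m : Int, 1 ≤ m → ((2 * ((((c :: t).take (2 * m).toNat).count c : Int)) == 2 * m) = true
      ↔ balAt c 0 (c :: t) (2 * m).toNat = (2 * m).toNat - 2 * m) := by
    intro m hm
    unfold balAt
    constructor
    · intro h
      have := of_decide_eq_true h
      omega
    · intro h
      apply decide_eq_true
      omega
  split
  case _ m hf =>
      obtain ⟨hm1, hmb, hpm, hmin⟩ := find?_pyRange_one_some _ _ _ _ hf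
      obtain ⟨mn, rfl⟩ : ∃ mn : Nat, m = (mn : Int) :=
        ⟨m.toNat, (Int.toNat_of_nonneg (le_trans zero_le_one hm1)).symm⟩
      have hmn1 : 1 ≤ mn := by exact_mod_cast hm1
      have htn : (2 * (mn : Int)).toNat = 2 * mn := by omega
      have hz : balAt c 0 (c :: t) (2 * mn) = 0 := by
        have := (hpred (mn : Int) hm1).mp hpm
        rw [htn] at this
        have h0 : ((2 * mn : Nat) : Int) - 2 * (mn : Int) = 0 := by push_cast; ring
        rw [h0] at this
        exact this
      have hle : 2 * mn ≤ t.length + 1 := by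
        have hmle : mn ≤ (t.length + 1) / 2 := by omega
        omega
      have hznz : ∀ j, 1 ≤ j → j < 2 * mn - 1 → balAt c 1 t j ≠ 0 := by
        intro j hj1 hjk hz0
        have hz' : balAt c 0 (c :: t) (j + 1) = 0 := by rw [hshift]; exact hz0
        have hpar : (j + 1) % 2 = 0 := by
          unfold balAt at hz'
          omega
        obtain ⟨m', hm'⟩ : ∃ m', j + 1 = 2 * m' := ⟨(j + 1) / 2, by omega⟩
        have hm'1 : 1 ≤ m' := by omega
        have hm'lt : m' < mn := by omega
        have := hmin (m' : Int) (by exact_mod_cast hm'1) (by exact_mod_cast hm'lt)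
        have hEq : balAt c 0 (c :: t) (2 * (m' : Int)).toNat = (2 * (m' : Int)).toNat - 2 * (m' : Int) := by
          have htn' : (2 * (m' : Int)).toNat = 2 * m' := by omega
          rw [htn']
          have hEq0 : balAt c 0 (c :: t) (2 * m') = 0 := by
            rw [(by omega : 2 * m' = j + 1)]; exact hz'
          rw [hEq0]
          push_cast
          ring
        rw [← hpred (m' : Int) (by exact_mod_cast hm'1)] at hEq
        rw [this] at hEq
        exact Bool.false_ne_true hEq
      have hscan : scan c 1 t = 2 * mn - 1 :=
        scan_eq_of_zero c 1 t (2 * mn - 1) (by omega) (by omega)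
          (by have := hshift (2 * mn - 1)
              rw [(by omega : 2 * mn - 1 + 1 = 2 * mn)] at this
              rw [← this]; exact hz)
          hznz
      rw [htn, hscan]
      omega
  case _ hf =>
      -- no even prefix balances: scan runs off the end
      have hall := List.find?_eq_none.mp hf
      have hnz : ∀ j, 1 ≤ j → j ≤ t.length → balAt c 1 t j ≠ 0 := by
        intro j hj1 hjl hz
        have hz' : balAt c 0 (c :: t) (j + 1) = 0 := by rw [hshift]; exact hz
        -- parity: a zero balance needs an even number of characters
        have hpar : (j + 1) % 2 = 0 := by
          unfold balAt at hz'
          omega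
        obtain ⟨m, hm⟩ : ∃ m, j + 1 = 2 * m := ⟨(j + 1) / 2, by omega⟩
        have hm1 : 1 ≤ m := by omega
        have hmle : (m : Int) < ((t.length + 1) / 2 : Nat) + 1 := by
          have : 2 * m ≤ t.length + 1 := by omega
          omega
        have hmem : (m : Int) ∈ PySem.List.pyRange 1 (((t.length + 1) / 2 : Nat) + 1) 1 := by
          rw [PySem.List.mem_pyRange_one]
          constructor
          · exact_mod_cast hm1
          · exact hmle
        have := hall _ hmem
        rw [Bool.not_eq_true] at this
        have hEq : balAt c 0 (c :: t) (2 * (m : Int)).toNat = (2 * (m : Int)).toNat - 2 * (m : Int) := by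
          have htn : (2 * (m : Int)).toNat = 2 * m := by omega
          rw [htn]
          have hEq0 : balAt c 0 (c :: t) (2 * m) = 0 := by
            rw [(by omega : 2 * m = j + 1)]; exact hz'
          rw [hEq0]
          push_cast
          ring
        rw [← hpred (m : Int) (by exact_mod_cast hm1)] at hEq
        rw [this] at hEq
        exact Bool.false_ne_true hEq
      rw [scan_eq_length_of_no_zero c 1 t hnz]

theorem segLoop_eq_segLoopB : ∀ (l : List Char), segLoop l = segLoopB l := by
  intro l
  induction hn : l.length using Nat.strong_induction_on generalizing l with
  | _ n ih =>
      cases l with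
      | nil => simp [segLoop, segLoopB]
      | cons c t =>
          rw [segLoop, segLoopB]
          have h0 : segEnd c 0 (c :: t) = segEnd c 1 t := by simp [segEnd]
          have hdrop : segEnd c 1 t = (c :: t).drop (cutOf (c :: t)) := by
            rw [segEnd_eq_drop_scan, cutOf_eq_scan]
            simp [List.drop_succ_cons]
          have hlt : (segEnd c 0 (c :: t)).length < n := by
            rw [h0, ← hn]
            exact Nat.lt_succ_of_le (by simpa using segEnd_length_le c 1 t)
          rw [ih _ hlt _ rfl, h0, hdrop]

-- ===== VERDICT (by name: the statement is the Claim_ definition above) =====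
theorem solution_spec : Claim_equal_solution := by
  intro s _ hpre
  have hne : s.toList ≠ [] := by
    intro h
    exact hpre (String.toList_eq_nil_iff.mp h)
  obtain ⟨c, rest, hcs⟩ := List.exists_cons_of_ne_nil hne
  have houter := (inner_outer s.toList s.toList).2 0 0 0 (s.toList.getD 0 ' ')
    (by simp) (by simp) (by intro _; simp [hcs])
  simp only [Spec_solution, solution, solution_alt]
  rw [List.range_eq_range', houter, segLoop_eq_segLoopB]
  ring

@[simp] theorem solution_raises : Claim_raises_solution := by
  unfold Claim_raises_solution
  refine ⟨by intro s _ hr hp; exact hp hr, by decide, by decide, ?_⟩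
  simp [solution_alt, pvRaiseWitness_solution, pvRaiseWitnessOut_solution, segLoopB]
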